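-- pv_equiv track=rewrite | github.com/liskos/kudryshov | ege23/138.py | f
-- ===== SOURCE A (Python) =====
-- def f(a,b):
--     if a == b :
--         return 1
--     if a < b :
--         return 0
--     x = len(bin(a)[2:]) - 1
--     s = '1' + '0' * x
--     if a == int(s,2):
--         return f(a - 1, b)
--     return f(a - 1,b) + f(int(s,2),b)
-- ===== SOURCE B (Python) =====
-- def f(a, b):
--     # Bottom-up DP: F[v] = number of paths from v down to b, computed once per v.
--     if a <= b:
--         return 1 if a == b else 0
--     F = {b: 1}
--     for v in range(b + 1, a + 1):
--         p = 1 << (v.bit_length() - 1)  # largest power of two <= v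
--         if v == p:
--             F[v] = F.get(v - 1, 0)
--         else:
--             F[v] = F.get(v - 1, 0) + F.get(p, 0)
--     return F[a]
-- ===== Notes on version B (the rewrite author's own statement) =====
-- stated objective: alternative
-- what changed: Replaces A's naive branching recursion with a bottom-up dynamic program that fills a dict of path counts once for each value from b up to a (computing the largest power of two via bit_length instead of a bin-string); each subproblem is solved once instead of repeatedly.
import Mathlib
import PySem

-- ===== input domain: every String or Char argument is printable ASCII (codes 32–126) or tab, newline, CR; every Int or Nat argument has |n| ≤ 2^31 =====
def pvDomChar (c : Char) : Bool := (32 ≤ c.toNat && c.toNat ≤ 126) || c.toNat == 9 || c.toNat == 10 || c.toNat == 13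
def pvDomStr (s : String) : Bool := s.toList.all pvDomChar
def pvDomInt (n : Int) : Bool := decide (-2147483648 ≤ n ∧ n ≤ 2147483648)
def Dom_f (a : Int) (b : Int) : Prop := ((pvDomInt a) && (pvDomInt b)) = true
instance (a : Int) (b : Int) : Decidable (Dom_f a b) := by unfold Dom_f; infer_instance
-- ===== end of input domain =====

-- B replaces A's naive branching recursion by a bottom-up dict DP over b..a (a different, asymptotically cheaper algorithm; a timing run could not measure a difference at its input sizes).

-- ===== PORT A =====
-- len(bin(a)[2:]): binary digits of |a|, plus the leftover 'b' character when a < 0 (bin(-5)[2:] = 'b101')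
def pyBinLen (a : Int) : Int :=
  if a = 0 then 1
  else if 0 < a then ((Nat.log2 a.toNat + 1 : Nat) : Int)
  else ((Nat.log2 a.natAbs + 2 : Nat) : Int)

-- termination helper for the port of A (cited in decreasing_by)
theorem pow_pyBinLen_le (a : Int) (h : 1 ≤ a) : (2 : Int) ^ ((pyBinLen a - 1).toNat) ≤ a := by
  have ha0 : a ≠ 0 := by omega
  have hpos : 0 < a := by omega
  have htn : a.toNat ≠ 0 := by omega
  have h1 : pyBinLen a = ((Nat.log2 a.toNat + 1 : Nat) : Int) := by
    simp [pyBinLen, ha0, hpos]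
  have h2 : (pyBinLen a - 1).toNat = Nat.log2 a.toNat := by
    rw [h1]; omega
  rw [h2]
  have := Nat.log2_self_le htn
  have hcast : ((2 ^ Nat.log2 a.toNat : Nat) : Int) ≤ ((a.toNat : Nat) : Int) := by
    exact_mod_cast this
  push_cast at hcast
  omega

def f (a : Int) (b : Int) : Int :=
  if _h1 : a = b then 1
  else if _h2 : a < b then 0
  else if _h3 : a ≤ 0 then 0  -- totality guard: reaching here with a ≤ 0 forces b < 0, where the Python A never returns (RecursionError); outside Pre_f
  else
    -- x = len(bin(a)[2:]) - 1 ; int('1' + '0' * x, 2) = 2 ^ x  (computed at each use, as Python re-parses s)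
    if _h4 : a = 2 ^ ((pyBinLen a - 1).toNat) then f (a - 1) b
    else f (a - 1) b + f (2 ^ ((pyBinLen a - 1).toNat)) b
termination_by (a - b).toNat
decreasing_by
  · omega
  · omega
  · have hs := pow_pyBinLen_le a (by omega)
    omega

-- ===== PORT B =====
-- v.bit_length()
def pyBitLength (v : Int) : Int :=
  if v = 0 then 0 else ((Nat.log2 v.natAbs + 1 : Nat) : Int)

-- the loop body of B
def fAltStep (F : PySem.Dict Int Int) (v : Int) : PySem.Dict Int Int :=
  let p : Int := 2 ^ ((pyBitLength v - 1).toNat)  -- 1 << (v.bit_length() - 1); Python raises for v = 0, unreachable inside Pre_f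
  if v = p then F.insert v (F.getD (v - 1) 0)
  else F.insert v (F.getD (v - 1) 0 + F.getD p 0)

def f_alt (a : Int) (b : Int) : Int :=
  if a ≤ b then (if a = b then 1 else 0)
  else
    let F := (PySem.List.pyRange (b + 1) (a + 1) 1).foldl fAltStep ((PySem.Dict.empty).insert b 1)
    F.getD a 0  -- F[a]; the key a is always present after the loop

-- ===== PRECONDITION & SPEC =====
-- Pre_f excludes exactly b < 0 < a - b, where Python A never returns (it recurses forever through f(1,b) ↔ f(0,b): RecursionError).
def Pre_f (a : Int) (b : Int) : Prop := 0 ≤ b ∨ a ≤ b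
instance (a : Int) (b : Int) : Decidable (Pre_f a b) := by unfold Pre_f; infer_instance
def pvWitness_f : Int × Int := (10, 2)

def Spec_f (a : Int) (b : Int) (out : Int) : Prop := out = f_alt a b
instance (a : Int) (b : Int) (out : Int) : Decidable (Spec_f a b out) := by unfold Spec_f; infer_instance

-- ===== CLAIM (what is proved, stated in full; the proofs are below) =====
def Claim_equal_f : Prop := ∀ (a : Int) (b : Int), Dom_f a b → Pre_f a b → Spec_f a b (f a b)

-- ===== LEMMAS AND PROOFS =====

theorem f_base_eq (a b : Int) (h : a = b) : f a b = 1 := by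
  rw [f]; rw [dif_pos h]

theorem f_base_lt (a b : Int) (h : a < b) : f a b = 0 := by
  rw [f]; rw [dif_neg (by omega : ¬ a = b), dif_pos h]

theorem pow_log2_le_int (v : Int) (hv : 0 < v) : (2 : Int) ^ Nat.log2 v.toNat ≤ v := by
  have htn : v.toNat ≠ 0 := by omega
  have := Nat.log2_self_le htn
  have hcast : ((2 ^ Nat.log2 v.toNat : Nat) : Int) ≤ ((v.toNat : Nat) : Int) := by exact_mod_cast this
  push_cast at hcast
  omega

theorem pyBinLen_toNat (v : Int) (hv : 0 < v) : (pyBinLen v - 1).toNat = Nat.log2 v.toNat := by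
  have h1 : pyBinLen v = ((Nat.log2 v.toNat + 1 : Nat) : Int) := by
    unfold pyBinLen; rw [if_neg (by omega), if_pos hv]
  rw [h1]; omega

theorem f_step (v b : Int) (hb : b < v) (hv : 0 < v) :
    f v b = f (v - 1) b +
      (if v = 2 ^ Nat.log2 v.toNat then 0 else f ((2 : Int) ^ Nat.log2 v.toNat) b) := by
  rw [f]
  rw [dif_neg (by omega : ¬ v = b), dif_neg (by omega : ¬ v < b), dif_neg (by omega : ¬ v ≤ 0)]
  rw [pyBinLen_toNat v hv]
  by_cases h4 : v = 2 ^ Nat.log2 v.toNat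
  · rw [dif_pos h4, if_pos h4]; omega
  · rw [dif_neg h4, if_neg h4]

theorem fAltStep_eq (F : PySem.Dict Int Int) (v : Int) (hv : 0 < v) :
    fAltStep F v =
      (if v = 2 ^ Nat.log2 v.toNat
        then F.insert v (F.getD (v - 1) 0)
        else F.insert v (F.getD (v - 1) 0 + F.getD ((2 : Int) ^ Nat.log2 v.toNat) 0)) := by
  have hp : (pyBitLength v - 1).toNat = Nat.log2 v.toNat := by
    have h1 : pyBitLength v = ((Nat.log2 v.natAbs + 1 : Nat) : Int) := by
      unfold pyBitLength; rw [if_neg (by omega)]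
    have h2 : v.natAbs = v.toNat := by omega
    rw [h1, h2]; omega
  simp only [fAltStep, hp]

theorem fold_inv (b : Int) (hb : 0 ≤ b) (n : Nat) :
    ∀ k : Int,
      ((PySem.List.pyRange (b + 1) (b + 1 + (n : Int)) 1).foldl fAltStep
          ((PySem.Dict.empty).insert b 1)).getD k 0
        = if k ≤ b + (n : Int) then f k b else 0 := by
  induction n with
  | zero =>
    intro k
    rw [(by push_cast; ring : b + 1 + ((0 : Nat) : Int) = b + 1)]
    rw [PySem.List.pyRange_one_eq_nil (by omega)]
    rw [List.foldl_nil, PySem.Dict.getD_insert]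
    by_cases hk : k = b
    · rw [if_pos hk, if_pos (by omega), hk, f_base_eq b b rfl]
    · rw [if_neg hk, PySem.Dict.getD_empty]
      by_cases hle : k ≤ b + ((0 : Nat) : Int)
      · rw [if_pos hle, f_base_lt k b (by omega)]
      · rw [if_neg hle]
  | succ n ih =>
    intro k
    set u : Int := b + 1 + (n : Int) with hu
    have hsplit : PySem.List.pyRange (b + 1) (b + 1 + ((n + 1 : Nat) : Int)) 1
        = PySem.List.pyRange (b + 1) u 1 ++ [u] := by
      rw [(by push_cast; ring : b + 1 + ((n + 1 : Nat) : Int) = u + 1)]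
      exact PySem.List.pyRange_one_succ_right (by omega)
    have hcast : ((n + 1 : Nat) : Int) = (n : Int) + 1 := by push_cast; ring
    rw [hsplit, List.foldl_append, List.foldl_cons, List.foldl_nil, hcast]
    have hu0 : 0 < u := by omega
    have hub : b < u := by omega
    rw [fAltStep_eq _ u hu0]
    set P : Int := 2 ^ Nat.log2 u.toNat with hP
    have hPle : P ≤ u := pow_log2_le_int u hu0
    have hP0 : 0 < P := by positivity
    have hval : f u b = f (u - 1) b + (if u = P then 0 else f P b) := f_step u b hub hu0
    by_cases hup : u = P
    · rw [if_pos hup] at hval ⊢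
      rw [PySem.Dict.getD_insert]
      by_cases hk : k = u
      · rw [if_pos hk, if_pos (by omega), hk, hval, ih (u - 1), if_pos (by omega)]; omega
      · rw [if_neg hk, ih k]
        by_cases hkle : k ≤ b + (n : Int)
        · rw [if_pos hkle, if_pos (by omega)]
        · rw [if_neg hkle, if_neg (by omega)]
    · rw [if_neg hup] at hval ⊢
      have hPlt : P ≤ b + (n : Int) := by omega
      rw [PySem.Dict.getD_insert]
      by_cases hk : k = u
      · rw [if_pos hk, if_pos (by omega), hk, hval, ih (u - 1), ih P,
           if_pos (by omega : u - 1 ≤ b + (n : Int)), if_pos hPlt]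
      · rw [if_neg hk, ih k]
        by_cases hkle : k ≤ b + (n : Int)
        · rw [if_pos hkle, if_pos (by omega)]
        · rw [if_neg hkle, if_neg (by omega)]

-- ===== VERDICT (by name: the statement is the Claim_ definition above) =====
theorem f_spec : Claim_equal_f := by
  intro a b _hdom hpre
  unfold Spec_f f_alt
  by_cases hab : a ≤ b
  · rw [if_pos hab]
    by_cases h : a = b
    · rw [if_pos h, f_base_eq a b h]
    · rw [if_neg h, f_base_lt a b (by omega)]
  · have hba : b < a := by omega
    have hb0 : 0 ≤ b := by rcases hpre with h | h; exact h; omega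
    rw [if_neg hab]
    set n : Nat := (a - b).toNat with hn
    have h1 : a + 1 = b + 1 + (n : Int) := by omega
    rw [h1, fold_inv b hb0 n a, if_pos (by omega)]
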